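-- pv_equiv track=rewrite | github.com/LordNounours/rice_atlas | src/rice_atlas/tracking.py | compute_h_max
-- ===== SOURCE A (Python) =====
-- def manhattan(p1, p2):
--     return abs(p1[0] - p2[0]) + abs(p1[1] - p2[1]) + abs(p1[2] - p2[2])
--
-- def compute_h_max(shape, goal_point):
--     z_size, y_size, x_size = shape
--     corners = [
--         (0, 0, 0),
--         (0, 0, x_size - 1),
--         (0, y_size - 1, 0),
--         (0, y_size - 1, x_size - 1),
--         (z_size - 1, 0, 0),
--         (z_size - 1, 0, x_size - 1),
--         (z_size - 1, y_size - 1, 0),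
--         (z_size - 1, y_size - 1, x_size - 1),
--     ]
--     return max(manhattan(corner, goal_point) for corner in corners)
-- ===== SOURCE B (Python) =====
-- def compute_h_max(shape, goal_point):
--     z_size, y_size, x_size = shape
--     gz, gy, gx = goal_point
--     dz = max(abs(gz), abs(gz - (z_size - 1)))
--     dy = max(abs(gy), abs(gy - (y_size - 1)))
--     dx = max(abs(gx), abs(gx - (x_size - 1)))
--     return dz + dy + dx
-- ===== Notes on version B (the rewrite author's own statement) =====
-- stated objective: simpler
-- what changed: Replaces enumerating all 8 box corners and maximising a Manhattan helper with a per-axis closed form: Manhattan distance is separable, so each axis contributes max(|g|, |g-(size-1)|) and the three contributions are summed.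
import Mathlib
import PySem

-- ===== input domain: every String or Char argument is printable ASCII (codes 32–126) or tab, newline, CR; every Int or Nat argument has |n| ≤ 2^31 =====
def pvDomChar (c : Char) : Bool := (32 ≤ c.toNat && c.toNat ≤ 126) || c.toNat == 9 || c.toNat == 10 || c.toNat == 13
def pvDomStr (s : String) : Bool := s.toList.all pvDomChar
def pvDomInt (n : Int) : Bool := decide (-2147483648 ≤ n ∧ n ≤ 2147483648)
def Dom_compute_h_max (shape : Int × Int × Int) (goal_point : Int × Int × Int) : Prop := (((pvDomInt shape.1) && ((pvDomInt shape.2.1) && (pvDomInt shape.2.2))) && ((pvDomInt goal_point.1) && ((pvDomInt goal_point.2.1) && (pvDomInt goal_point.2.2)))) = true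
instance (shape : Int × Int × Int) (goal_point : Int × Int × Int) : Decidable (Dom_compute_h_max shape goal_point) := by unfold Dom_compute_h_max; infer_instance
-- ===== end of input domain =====

-- ===== PORT A =====
-- B replaces the 8-corner enumeration and Manhattan helper with a per-axis closed form (simpler; return-value equivalence proved below).
def pv_manhattan (p1 : Int × Int × Int) (p2 : Int × Int × Int) : Int :=
  (p1.1 - p2.1).natAbs + (p1.2.1 - p2.2.1).natAbs + (p1.2.2 - p2.2.2).natAbs

def compute_h_max (shape : Int × Int × Int) (goal_point : Int × Int × Int) : Int :=
  let z_size := shape.1; let y_size := shape.2.1; let x_size := shape.2.2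
  let corners : List (Int × Int × Int) :=
    [ (0, 0, 0), (0, 0, x_size - 1), (0, y_size - 1, 0), (0, y_size - 1, x_size - 1),
      (z_size - 1, 0, 0), (z_size - 1, 0, x_size - 1), (z_size - 1, y_size - 1, 0),
      (z_size - 1, y_size - 1, x_size - 1) ]
  ((corners.map (fun c => pv_manhattan c goal_point)).max?).getD 0

-- ===== PORT B =====
def compute_h_max_alt (shape : Int × Int × Int) (goal_point : Int × Int × Int) : Int :=
  let gz := goal_point.1; let gy := goal_point.2.1; let gx := goal_point.2.2
  let dz := max (|gz|) (|gz - (shape.1 - 1)|)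
  let dy := max (|gy|) (|gy - (shape.2.1 - 1)|)
  let dx := max (|gx|) (|gx - (shape.2.2 - 1)|)
  dz + dy + dx

-- ===== PRECONDITION & SPEC =====
def Spec_compute_h_max (shape : Int × Int × Int) (goal_point : Int × Int × Int) (out : Int) : Prop := out = compute_h_max_alt shape goal_point
instance (shape : Int × Int × Int) (goal_point : Int × Int × Int) (out : Int) : Decidable (Spec_compute_h_max shape goal_point out) := by unfold Spec_compute_h_max; infer_instance

-- ===== CLAIM (what is proved, stated in full; the proofs are below) =====
def Claim_equal_compute_h_max : Prop := ∀ (shape : Int × Int × Int) (goal_point : Int × Int × Int), Dom_compute_h_max shape goal_point → Spec_compute_h_max shape goal_point (compute_h_max shape goal_point)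

-- ===== LEMMAS AND PROOFS =====
theorem pv_max_add3 (A A' B B' C C' : Int) :
    max (A + B + C) (max (A + B + C') (max (A + B' + C) (max (A + B' + C')
      (max (A' + B + C) (max (A' + B + C') (max (A' + B' + C) (A' + B' + C'))))))) =
      max A A' + max B B' + max C C' := by
  apply le_antisymm
  · simp only [max_le_iff]
    refine ⟨?_, ?_, ?_, ?_, ?_, ?_, ?_, ?_⟩ <;> omega
  · rcases le_total A A' with hz | hz <;>
      rcases le_total B B' with hy | hy <;>
        rcases le_total C C' with hx | hx
    · rw [max_eq_right hz, max_eq_right hy, max_eq_right hx]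
      refine le_max_of_le_right ?_
      refine le_max_of_le_right ?_
      refine le_max_of_le_right ?_
      refine le_max_of_le_right ?_
      refine le_max_of_le_right ?_
      refine le_max_of_le_right ?_
      refine le_max_of_le_right ?_
      omega
    · rw [max_eq_right hz, max_eq_right hy, max_eq_left hx]
      refine le_max_of_le_right ?_
      refine le_max_of_le_right ?_
      refine le_max_of_le_right ?_
      refine le_max_of_le_right ?_
      refine le_max_of_le_right ?_
      refine le_max_of_le_right ?_
      refine le_max_of_le_left ?_
      omega
    · rw [max_eq_right hz, max_eq_left hy, max_eq_right hx]
      refine le_max_of_le_right ?_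
      refine le_max_of_le_right ?_
      refine le_max_of_le_right ?_
      refine le_max_of_le_right ?_
      refine le_max_of_le_right ?_
      refine le_max_of_le_left ?_
      omega
    · rw [max_eq_right hz, max_eq_left hy, max_eq_left hx]
      refine le_max_of_le_right ?_
      refine le_max_of_le_right ?_
      refine le_max_of_le_right ?_
      refine le_max_of_le_right ?_
      refine le_max_of_le_left ?_
      omega
    · rw [max_eq_left hz, max_eq_right hy, max_eq_right hx]
      refine le_max_of_le_right ?_
      refine le_max_of_le_right ?_
      refine le_max_of_le_right ?_
      refine le_max_of_le_left ?_
      omega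
    · rw [max_eq_left hz, max_eq_right hy, max_eq_left hx]
      refine le_max_of_le_right ?_
      refine le_max_of_le_right ?_
      refine le_max_of_le_left ?_
      omega
    · rw [max_eq_left hz, max_eq_left hy, max_eq_right hx]
      refine le_max_of_le_right ?_
      refine le_max_of_le_left ?_
      omega
    · rw [max_eq_left hz, max_eq_left hy, max_eq_left hx]
      refine le_max_of_le_left ?_
      omega

-- ===== VERDICT (by name: the statement is the Claim_ definition above) =====
set_option maxHeartbeats 800000 in
theorem compute_h_max_spec : Claim_equal_compute_h_max := by
  intro shape goal_point _
  obtain ⟨z, y, x⟩ := shape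
  obtain ⟨gz, gy, gx⟩ := goal_point
  unfold Spec_compute_h_max
  simp only [compute_h_max, compute_h_max_alt, pv_manhattan,
    List.map_cons, List.map_nil, List.max?_cons, List.max?_nil, Option.elim, Option.getD,
    Int.abs_eq_natAbs]
  have e1 : (((0:Int) - gz).natAbs : Int) = (gz.natAbs : Int) := by omega
  have e2 : (((0:Int) - gy).natAbs : Int) = (gy.natAbs : Int) := by omega
  have e3 : (((0:Int) - gx).natAbs : Int) = (gx.natAbs : Int) := by omega
  have e4 : ((z - 1 - gz).natAbs : Int) = ((gz - (z - 1)).natAbs : Int) := by omega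
  have e5 : ((y - 1 - gy).natAbs : Int) = ((gy - (y - 1)).natAbs : Int) := by omega
  have e6 : ((x - 1 - gx).natAbs : Int) = ((gx - (x - 1)).natAbs : Int) := by omega
  rw [e1, e2, e3, e4, e5, e6]
  exact pv_max_add3 _ _ _ _ _ _
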